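-- pv_equiv track=rewrite | github.com/Somg10/GFG-Problem-of-the-day | Bitwise AND of the Array.py | count
-- ===== SOURCE A (Python) =====
-- def count(N, A, X):
--     # code here
--     p=0
--     ans=N
--     for i in range(30,-1,-1):
--         if ((X>>i)&1)!=0:
--             p^=(2**i)
--             continue
--         c=0
--         pr=p^(2**i)
--         for j in A:
--             if (j&pr)==pr:
--                 c+=1
--         ans=min(ans,N-c)
--     return ans
-- ===== SOURCE B (Python) =====
-- def count(N, A, X):
--     # Trie-style descent over bits 30..0: maintain the survivor list S of elements
--     # matching the prefix so far; at a set bit of X filter S by that bit, at a zero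
--     # bit count survivors having the bit and take the min with the rest.
--     def go(i, S):
--         if i < 0:
--             return N
--         if (X >> i) & 1:
--             return go(i - 1, [j for j in S if (j >> i) & 1])
--         return min(N - sum(1 for j in S if (j >> i) & 1), go(i - 1, S))
--     return go(30, A)
-- ===== Notes on version B (the rewrite author's own statement) =====
-- stated objective: alternative
-- what changed: Replaces A's bit-major loop that rescans the whole array against a full multi-bit prefix mask for every zero bit of X by a trie-style recursive descent that never builds masks: it maintains the shrinking list of survivors matching the prefix so far and tests one single bit per step, counting survivors at each zero bit.
import Mathlib
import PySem

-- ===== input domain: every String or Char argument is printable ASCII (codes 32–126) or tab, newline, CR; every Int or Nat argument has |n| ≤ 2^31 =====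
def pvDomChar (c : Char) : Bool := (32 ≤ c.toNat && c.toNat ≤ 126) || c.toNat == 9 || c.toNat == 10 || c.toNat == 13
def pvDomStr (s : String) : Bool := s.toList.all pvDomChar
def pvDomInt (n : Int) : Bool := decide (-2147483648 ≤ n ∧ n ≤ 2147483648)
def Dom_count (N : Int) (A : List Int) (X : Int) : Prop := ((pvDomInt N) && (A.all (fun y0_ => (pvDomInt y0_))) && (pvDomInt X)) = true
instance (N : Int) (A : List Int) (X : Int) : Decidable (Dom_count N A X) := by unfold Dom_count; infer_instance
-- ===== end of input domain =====

-- B replaces A's bit-major rescans of the whole array with full-prefix masks by a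
-- trie-style recursive descent that maintains the list of still-matching survivors and
-- tests a single bit at a time (objective: alternative algorithm/data maintenance).

-- ===== PORT A =====
-- literal port of A: state (p, ans); for each bit 30..0, either extend the prefix p
-- or rescan all of A against the mask p ^ 2**i and take the running min of N - c.
def count (N : Int) (A : List Int) (X : Int) : Int :=
  ((PySem.List.pyRange 30 (-1) (-1)).foldl
    (fun (st : Int × Int) (i : Int) =>
      if PySem.Int.band (X >>> i.toNat) 1 ≠ 0 then
        (PySem.Int.bxor st.1 (2 ^ i.toNat), st.2)
      else
        (st.1,
          min st.2
            (N - A.foldl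
              (fun c j =>
                if PySem.Int.band j (PySem.Int.bxor st.1 (2 ^ i.toNat)) = PySem.Int.bxor st.1 (2 ^ i.toNat)
                then c + 1 else c) 0)))
    ((0 : Int), N)).2

-- ===== PORT B =====
-- port of B's recursive helper go(i, S): descend bits 30..0; at a set bit of X filter
-- the survivor list by that bit, at a zero bit count survivors having the bit and min
-- with the recursive result; sum(1 for j in S if …) is ported as List.countP.
def count_alt_go (N : Int) (X : Int) (i : Int) (S : List Int) : Int :=
  if _h : i < 0 then N
  else if PySem.Int.band (X >>> i.toNat) 1 ≠ 0 then
    count_alt_go N X (i - 1) (S.filter (fun j : Int => PySem.Int.band (j >>> i.toNat) 1 ≠ 0))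
  else
    min (N - (S.countP (fun j : Int => decide (PySem.Int.band (j >>> i.toNat) 1 ≠ 0)) : Int))
        (count_alt_go N X (i - 1) S)
termination_by (i + 1).toNat
decreasing_by all_goals omega

def count_alt (N : Int) (A : List Int) (X : Int) : Int := count_alt_go N X 30 A

-- ===== PRECONDITION & SPEC =====
def Spec_count (N : Int) (A : List Int) (X : Int) (out : Int) : Prop := out = count_alt N A X
instance (N : Int) (A : List Int) (X : Int) (out : Int) : Decidable (Spec_count N A X out) := by unfold Spec_count; infer_instance

-- ===== CLAIM (what is proved, stated in full; the proofs are below) =====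
def Claim_equal_count : Prop := ∀ (N : Int) (A : List Int) (X : Int), Dom_count N A X → Spec_count N A X (count N A X)

-- ===== LEMMAS AND PROOFS =====

theorem pv_ldiff_add_and (q : Nat) : ∀ m : Nat, Nat.ldiff q m + (q &&& m) = q := by
  induction q using Nat.binaryRec with
  | zero =>
    intro m
    have h1 : Nat.ldiff 0 m = 0 := Nat.eq_of_testBit_eq fun i => by
      simp [Nat.testBit_ldiff, Nat.zero_testBit]
    simp [h1]
  | bit b q ih =>
    intro m
    obtain ⟨b2, m2, rfl⟩ : ∃ b2 m2, m = Nat.bit b2 m2 :=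
      ⟨m.testBit 0, m >>> 1, (Nat.bit_testBit_zero_shiftRight_one m).symm⟩
    rw [Nat.ldiff_bit, Nat.land_bit, Nat.bit_val, Nat.bit_val, Nat.bit_val]
    have := ih m2
    cases b <;> cases b2 <;> simp <;> omega

theorem pv_sub_and (m n : Nat) : m - (m &&& n) = Nat.ldiff m n := by
  have := pv_ldiff_add_and m n; omega

theorem pv_band_eq_land (a b : Int) : PySem.Int.band a b = Int.land a b := by
  cases a with
  | ofNat m =>
    cases b with
    | ofNat n =>
      show PySem.Int.band (Int.ofNat m) (Int.ofNat n) = Int.ofNat (m &&& n)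
      simp [PySem.Int.band]
    | negSucc n =>
      show PySem.Int.band (Int.ofNat m) (Int.negSucc n) = Int.ofNat (Nat.ldiff m n)
      have hn : ¬ ((n:Int) ≤ -1) := by omega
      simp [PySem.Int.band, hn, Int.negSucc_eq]
      rw [pv_sub_and]
  | negSucc m =>
    cases b with
    | ofNat n =>
      show PySem.Int.band (Int.negSucc m) (Int.ofNat n) = Int.ofNat (Nat.ldiff n m)
      have hm : ¬ ((m:Int) ≤ -1) := by omega
      simp [PySem.Int.band, hm, Int.negSucc_eq]
      rw [pv_sub_and]
    | negSucc n =>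
      show PySem.Int.band (Int.negSucc m) (Int.negSucc n) = Int.negSucc (m ||| n)
      have hm : ¬ ((m:Int) ≤ -1) := by omega
      have hn : ¬ ((n:Int) ≤ -1) := by omega
      simp [PySem.Int.band, hm, hn, Int.negSucc_eq]
      omega

theorem pv_bxor_eq_xor (a b : Int) : PySem.Int.bxor a b = Int.xor a b := by
  cases a with
  | ofNat m =>
    cases b with
    | ofNat n =>
      show _ = Int.ofNat (m ^^^ n)
      simp [PySem.Int.bxor]
    | negSucc n =>
      show _ = Int.negSucc (m ^^^ n)
      have hn : ¬ ((n:Int) ≤ -1) := by omega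
      simp [PySem.Int.bxor, hn, Int.negSucc_eq]
      omega
  | negSucc m =>
    cases b with
    | ofNat n =>
      show _ = Int.negSucc (m ^^^ n)
      have hm : ¬ ((m:Int) ≤ -1) := by omega
      simp [PySem.Int.bxor, hm, Int.negSucc_eq]
      omega
    | negSucc n =>
      show _ = Int.ofNat (m ^^^ n)
      have hm : ¬ ((m:Int) ≤ -1) := by omega
      have hn : ¬ ((n:Int) ≤ -1) := by omega
      simp [PySem.Int.bxor, hm, hn, Int.negSucc_eq]

theorem pv_int_ext {a b : Int} (h : ∀ k, a.testBit k = b.testBit k) : a = b := by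
  cases a with
  | ofNat m =>
    cases b with
    | ofNat n => exact congrArg Int.ofNat (Nat.eq_of_testBit_eq h)
    | negSucc n =>
      exfalso
      have hk := h (m + n)
      have hm : m.testBit (m + n) = false := Nat.testBit_lt_two_pow (by
        calc m ≤ m + n := Nat.le_add_right m n
        _ < 2 ^ (m + n) := Nat.lt_two_pow_self)
      have hn : n.testBit (m + n) = false := Nat.testBit_lt_two_pow (by
        calc n ≤ m + n := Nat.le_add_left n m
        _ < 2 ^ (m + n) := Nat.lt_two_pow_self)
      rw [show (Int.ofNat m).testBit (m+n) = m.testBit (m+n) from rfl,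
          show (Int.negSucc n).testBit (m+n) = !n.testBit (m+n) from rfl, hm, hn] at hk
      exact Bool.false_ne_true hk
  | negSucc m =>
    cases b with
    | ofNat n =>
      exfalso
      have hk := h (m + n)
      have hm : m.testBit (m + n) = false := Nat.testBit_lt_two_pow (by
        calc m ≤ m + n := Nat.le_add_right m n
        _ < 2 ^ (m + n) := Nat.lt_two_pow_self)
      have hn : n.testBit (m + n) = false := Nat.testBit_lt_two_pow (by
        calc n ≤ m + n := Nat.le_add_left n m
        _ < 2 ^ (m + n) := Nat.lt_two_pow_self)
      rw [show (Int.negSucc m).testBit (m+n) = !m.testBit (m+n) from rfl,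
          show (Int.ofNat n).testBit (m+n) = n.testBit (m+n) from rfl, hm, hn] at hk
      exact Bool.false_ne_true hk.symm
    | negSucc n =>
      refine congrArg Int.negSucc (Nat.eq_of_testBit_eq fun i => ?_)
      have := h i
      rw [show (Int.negSucc m).testBit i = !m.testBit i from rfl,
          show (Int.negSucc n).testBit i = !n.testBit i from rfl] at this
      exact Bool.not_inj this

theorem pv_testBit_band (a b : Int) (k : Nat) :
    (PySem.Int.band a b).testBit k = (a.testBit k && b.testBit k) := by
  rw [pv_band_eq_land]; exact Int.testBit_land a b k

theorem pv_testBit_bxor (a b : Int) (k : Nat) :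
    (PySem.Int.bxor a b).testBit k = (a.testBit k ^^ b.testBit k) := by
  rw [pv_bxor_eq_xor]; exact Int.testBit_lxor a b k

theorem pv_testBit_two_pow (n k : Nat) : ((2:Int) ^ n).testBit k = decide (n = k) := by
  have h : (2:Int) ^ n = Int.ofNat (2 ^ n) := by rfl
  rw [h, show (Int.ofNat (2^n)).testBit k = (2^n : Nat).testBit k from rfl]
  exact Nat.testBit_two_pow

theorem pv_band_eq_self_iff (j q : Int) :
    PySem.Int.band j q = q ↔ ∀ k, q.testBit k = true → j.testBit k = true := by
  constructor
  · intro h k hk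
    have := congrArg (fun z => Int.testBit z k) h
    simp only [pv_testBit_band, hk, Bool.and_true] at this
    exact this
  · intro h
    refine pv_int_ext fun k => ?_
    rw [pv_testBit_band]
    cases hq : q.testBit k with
    | false => simp
    | true => simp [h k hq]

theorem pv_bit_test (j : Int) (n : Nat) :
    (PySem.Int.band (j >>> n) 1 ≠ 0) ↔ j.testBit n = true := by
  rw [pv_band_eq_land]
  cases j with
  | ofNat m =>
    rw [show (Int.ofNat m) >>> n = Int.ofNat (m >>> n) from rfl,
        show Int.land (Int.ofNat (m >>> n)) 1 = Int.ofNat ((m >>> n) &&& 1) from rfl,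
        Nat.and_one_is_mod,
        show (Int.ofNat m).testBit n = m.testBit n from rfl,
        show m.testBit n = (m >>> n).testBit 0 by rw [Nat.testBit_shiftRight, Nat.add_zero],
        Int.ofNat_eq_natCast, ← Nat.mod_two_eq_one_iff_testBit_zero]
    omega
  | negSucc m =>
    rw [show (Int.negSucc m) >>> n = Int.negSucc (m >>> n) from rfl,
        show Int.land (Int.negSucc (m >>> n)) 1 = Int.ofNat (Nat.ldiff 1 (m >>> n)) from rfl,
        show (Int.negSucc m).testBit n = !m.testBit n from rfl,
        show m.testBit n = (m >>> n).testBit 0 by rw [Nat.testBit_shiftRight, Nat.add_zero],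
        ← (pv_sub_and 1 (m >>> n)), Nat.and_comm, Nat.and_one_is_mod, Int.ofNat_eq_natCast]
    have h2 := @Nat.mod_two_eq_one_iff_testBit_zero (m >>> n)
    cases hb : (m >>> n).testBit 0 with
    | false =>
      rw [hb] at h2
      simp only [Bool.false_eq_true, iff_false] at h2
      simp only [Bool.not_false, iff_true]
      omega
    | true =>
      rw [hb] at h2
      simp only [iff_true] at h2
      constructor
      · intro h
        exfalso
        apply h
        rw [h2]
        rfl
      · intro h
        exact absurd h (by simp)

theorem pv_split_band (j p : Int) (n : Nat) (hp : p.testBit n = false) :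
    PySem.Int.band j (PySem.Int.bxor p (2 ^ n)) = PySem.Int.bxor p (2 ^ n) ↔
      (PySem.Int.band (j >>> n) 1 ≠ 0 ∧ PySem.Int.band j p = p) := by
  rw [pv_band_eq_self_iff, pv_band_eq_self_iff, pv_bit_test]
  have hq : ∀ k, (PySem.Int.bxor p (2 ^ n)).testBit k = (p.testBit k ^^ decide (n = k)) := by
    intro k; rw [pv_testBit_bxor, pv_testBit_two_pow]
  constructor
  · intro h
    constructor
    · apply h n
      rw [hq n, hp]
      simp
    · intro k hk
      apply h k
      rw [hq k]
      have hkn : n ≠ k := fun e => by rw [← e, hp] at hk; exact Bool.false_ne_true hk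
      simp [hk, hkn]
  · rintro ⟨hj, hsub⟩ k hk
    rw [hq k] at hk
    by_cases hkn : n = k
    · subst hkn; exact hj
    · simp [hkn] at hk
      exact hsub k hk

def pvBits (n : Nat) : List Int := (List.range n).reverse.map (fun k => (k : Int))

theorem pvBits_succ (n : Nat) : pvBits (n + 1) = (n : Int) :: pvBits n := by
  simp [pvBits, List.range_succ]

theorem pv_go_le (N X : Int) : ∀ (k : Nat) (i : Int) (S : List Int), (i + 1).toNat = k →
    count_alt_go N X i S ≤ N := by
  intro k
  induction k with
  | zero =>
    intro i S hk
    rw [count_alt_go, dif_pos (by omega)]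
  | succ k ih =>
    intro i S hk
    rw [count_alt_go, dif_neg (by omega)]
    split
    · exact ih (i - 1) _ (by omega)
    · exact le_trans (min_le_right _ _) (ih (i - 1) _ (by omega))

theorem pv_loop_eq (N X : Int) (A : List Int) :
    ∀ (n : Nat) (p a : Int),
      (∀ b : Nat, b < n → p.testBit b = false) → a ≤ N →
      ((pvBits n).foldl
        (fun (st : Int × Int) (i : Int) =>
          if PySem.Int.band (X >>> i.toNat) 1 ≠ 0 then
            (PySem.Int.bxor st.1 (2 ^ i.toNat), st.2)
          else
            (st.1,
              min st.2
                (N - A.foldl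
                  (fun c j =>
                    if PySem.Int.band j (PySem.Int.bxor st.1 (2 ^ i.toNat)) = PySem.Int.bxor st.1 (2 ^ i.toNat)
                    then c + 1 else c) 0)))
        (p, a)).2
      = min a (count_alt_go N X ((n : Int) - 1)
          (A.filter (fun j => decide (PySem.Int.band j p = p)))) := by
  intro n
  induction n with
  | zero =>
    intro p a _ ha
    rw [count_alt_go, dif_pos (by norm_num)]
    simp [pvBits, min_eq_left ha]
  | succ n ih =>
    intro p a hp ha
    rw [pvBits_succ, List.foldl_cons]
    have htn : ((n : Int)).toNat = n := Int.toNat_natCast n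
    have hcast : ((n + 1 : Nat) : Int) - 1 = (n : Int) := by push_cast; ring
    rw [hcast, count_alt_go, dif_neg (by omega)]
    simp only [htn]
    by_cases hx : PySem.Int.band (X >>> n) 1 ≠ 0
    · rw [if_pos hx, if_pos hx]
      have hstep := ih (PySem.Int.bxor p (2 ^ n)) a (fun b hb => by
        rw [pv_testBit_bxor, pv_testBit_two_pow, hp b (by omega)]
        simp [Nat.ne_of_gt hb]) ha
      rw [hstep]
      congr 2
      rw [List.filter_filter]
      apply List.filter_congr
      intro j _
      rw [Bool.eq_iff_iff]
      simp only [Bool.and_eq_true, decide_eq_true_eq]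
      exact pv_split_band j p n (hp n (by omega))
    · rw [if_neg hx, if_neg hx]
      have hc : A.foldl
          (fun c j =>
            if PySem.Int.band j (PySem.Int.bxor p (2 ^ n)) = PySem.Int.bxor p (2 ^ n)
            then c + 1 else c) 0
          = (A.countP (fun j => decide (PySem.Int.band j (PySem.Int.bxor p (2 ^ n)) = PySem.Int.bxor p (2 ^ n))) : Int) := by
        rw [PySem.List.foldl_ite_add_one]
        ring
      have hstep := ih p (min a (N - A.foldl
          (fun c j =>
            if PySem.Int.band j (PySem.Int.bxor p (2 ^ n)) = PySem.Int.bxor p (2 ^ n)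
            then c + 1 else c) 0))
        (fun b hb => hp b (by omega)) (le_trans (min_le_left _ _) ha)
      rw [hstep, hc]
      have hcnt : (List.filter (fun j => decide (PySem.Int.band j p = p)) A).countP
            (fun j : Int => decide (PySem.Int.band (j >>> n) 1 ≠ 0))
          = A.countP (fun j => decide (PySem.Int.band j (PySem.Int.bxor p (2 ^ n)) = PySem.Int.bxor p (2 ^ n))) := by
        rw [List.countP_filter]
        apply List.countP_congr
        intro j _
        simp only [Bool.and_eq_true, decide_eq_true_eq]
        rw [pv_split_band j p n (hp n (by omega))]
      rw [hcnt]
      rw [min_assoc]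

theorem pv_count_eq (N : Int) (A : List Int) (X : Int) : count N A X = count_alt N A X := by
  unfold count count_alt
  have hbl : PySem.List.pyRange 30 (-1) (-1) = pvBits 31 := by decide
  rw [hbl]
  have h0 : ∀ b : Nat, b < 31 → (0 : Int).testBit b = false := fun b _ => Nat.zero_testBit b
  have h := pv_loop_eq N X A 31 0 N h0 le_rfl
  rw [show ((31 : Nat) : Int) - 1 = 30 by norm_num] at h
  rw [h]
  have hfilter : A.filter (fun j => decide (PySem.Int.band j 0 = 0)) = A := by
    simp [PySem.Int.band_zero]
  rw [hfilter]
  exact min_eq_right (pv_go_le N X 31 30 A (by decide))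

-- ===== VERDICT (by name: the statement is the Claim_ definition above) =====
theorem count_spec : Claim_equal_count := by
  intro N A X _
  show count N A X = count_alt N A X
  exact pv_count_eq N A X
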